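-- pv_equiv track=rewrite | github.com/michi-vo/ba_hyperspectral_segmentation | src/wavelength_selection.py | expand_indices_with_adjacent
-- ===== SOURCE A (Python) =====
-- def get_adjusted_indices(i, n_adjacent, total_length):
--     if i <= n_adjacent:
--         start, end = 0, min(2 * n_adjacent + 1, total_length)
--     elif i >= total_length - n_adjacent - 1:
--         start, end = max(0, total_length - 2 * n_adjacent - 1), total_length
--     else:
--         start, end = i - n_adjacent, i + n_adjacent + 1
--     return list(range(start, end))
--
-- def expand_indices_with_adjacent(array, n_adjacent, total_length):
--     all_indices = [get_adjusted_indices(i, n_adjacent, total_length) for i in array]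
--     combined_indices = []
--     last_val = None
--     for sublist in all_indices:
--         for index in sublist:
--             if index != last_val:
--                 combined_indices.append(index)
--                 last_val = index
--
--     return combined_indices
-- ===== SOURCE B (Python) =====
-- def get_adjusted_indices(i, n_adjacent, total_length):
--     if i <= n_adjacent:
--         start, end = 0, min(2 * n_adjacent + 1, total_length)
--     elif i >= total_length - n_adjacent - 1:
--         start, end = max(0, total_length - 2 * n_adjacent - 1), total_length
--     else:
--         start, end = i - n_adjacent, i + n_adjacent + 1
--     return list(range(start, end))
--
-- def expand_indices_with_adjacent(array, n_adjacent, total_length):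
--     # Each range is strictly increasing, so duplicates can occur only at the
--     # boundary between consecutive ranges: extend in bulk with one check.
--     result = []
--     for i in array:
--         r = get_adjusted_indices(i, n_adjacent, total_length)
--         if result and r and r[0] == result[-1]:
--             result.extend(r[1:])
--         else:
--             result.extend(r)
--     return result
-- ===== Notes on version B (the rewrite author's own statement) =====
-- stated objective: simpler
-- what changed: Replaces the per-element last_val dedup loop over all expanded indices with bulk extension of each strictly increasing range, checking a duplicate only at the single boundary between consecutive ranges.
import Mathlib
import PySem

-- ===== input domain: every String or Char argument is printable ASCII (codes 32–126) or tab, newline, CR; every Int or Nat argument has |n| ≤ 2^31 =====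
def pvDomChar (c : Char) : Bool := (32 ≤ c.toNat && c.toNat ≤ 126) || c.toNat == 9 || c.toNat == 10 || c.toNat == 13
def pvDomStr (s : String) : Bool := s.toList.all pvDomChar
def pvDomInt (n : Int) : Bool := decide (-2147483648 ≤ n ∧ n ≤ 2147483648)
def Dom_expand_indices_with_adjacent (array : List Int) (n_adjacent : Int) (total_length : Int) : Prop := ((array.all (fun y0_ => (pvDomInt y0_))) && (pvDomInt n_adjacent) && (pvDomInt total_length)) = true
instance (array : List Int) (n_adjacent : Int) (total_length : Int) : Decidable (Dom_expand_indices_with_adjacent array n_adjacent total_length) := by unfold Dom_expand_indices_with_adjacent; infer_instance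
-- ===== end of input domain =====

-- B replaces A's per-element last_val dedup loop by bulk extension of each
-- strictly increasing range with a single boundary check per range (objective: simpler).

-- ===== PORT A =====
def get_adjusted_indices (i n_adjacent total_length : Int) : List Int :=
  if i ≤ n_adjacent then
    PySem.List.pyRange 0 (min (2 * n_adjacent + 1) total_length) 1
  else if i ≥ total_length - n_adjacent - 1 then
    PySem.List.pyRange (max 0 (total_length - 2 * n_adjacent - 1)) total_length 1
  else
    PySem.List.pyRange (i - n_adjacent) (i + n_adjacent + 1) 1

def expand_indices_with_adjacent (array : List Int) (n_adjacent : Int) (total_length : Int) : List Int :=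
  let all_indices := array.map (fun i => get_adjusted_indices i n_adjacent total_length)
  (all_indices.foldl (fun s sublist =>
      sublist.foldl (fun s index =>
        match s.2 with
        | some v => if index ≠ v then (s.1 ++ [index], some index) else s
        | none => (s.1 ++ [index], some index)) s)
    (([] : List Int), (none : Option Int))).1

-- ===== PORT B =====
def expand_indices_with_adjacent_alt (array : List Int) (n_adjacent : Int) (total_length : Int) : List Int :=
  array.foldl (fun result i =>
    let r := get_adjusted_indices i n_adjacent total_length
    match r, result.getLast? with
    | x :: t, some y => if x = y then result ++ t else result ++ r
    | _, _ => result ++ r) []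

-- ===== PRECONDITION & SPEC =====
def Spec_expand_indices_with_adjacent (array : List Int) (n_adjacent : Int) (total_length : Int) (out : List Int) : Prop := out = expand_indices_with_adjacent_alt array n_adjacent total_length
instance (array : List Int) (n_adjacent : Int) (total_length : Int) (out : List Int) : Decidable (Spec_expand_indices_with_adjacent array n_adjacent total_length out) := by unfold Spec_expand_indices_with_adjacent; infer_instance

-- ===== CLAIM (what is proved, stated in full; the proofs are below) =====
def Claim_equal_expand_indices_with_adjacent : Prop := ∀ (array : List Int) (n_adjacent : Int) (total_length : Int), Dom_expand_indices_with_adjacent array n_adjacent total_length → Spec_expand_indices_with_adjacent array n_adjacent total_length (expand_indices_with_adjacent array n_adjacent total_length)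

-- ===== LEMMAS AND PROOFS =====

-- A's inner-loop step (append index unless it equals the running last value)
def pvStep (s : List Int × Option Int) (index : Int) : List Int × Option Int :=
  match s.2 with
  | some v => if index ≠ v then (s.1 ++ [index], some index) else s
  | none => (s.1 ++ [index], some index)

-- B's per-range extension of the accumulated result c by range r
def pvChunk (c r : List Int) : List Int :=
  match r, c.getLast? with
  | x :: t, some y => if x = y then c ++ t else c ++ r
  | _, _ => c ++ r

theorem pvChain_range (a b : Int) : (PySem.List.pyRange a b 1).IsChain (· ≠ ·) :=
  ((PySem.List.pairwise_lt_pyRange_one a b).imp (fun h => ne_of_lt h)).isChain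

theorem pvChain_ga (i n t : Int) : (get_adjusted_indices i n t).IsChain (· ≠ ·) := by
  unfold get_adjusted_indices
  split_ifs <;> exact pvChain_range _ _

theorem pvChunk_append (c r : List Int)
    (h : ∀ z, r.head? = some z → c.getLast? ≠ some z) : pvChunk c r = c ++ r := by
  cases r with
  | nil => simp [pvChunk]
  | cons z t =>
    cases hc : c.getLast? with
    | none => simp [pvChunk, hc]
    | some y =>
      have hzy : z ≠ y := by
        intro he; exact h z rfl (he ▸ hc)
      simp [pvChunk, hc, hzy]

-- Folding A's dedup step over a list with no equal adjacent elements,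
-- starting from (c, c.getLast?), yields B's bulk extension.
theorem pvInner (r : List Int) (hr : r.IsChain (· ≠ ·)) :
    ∀ c : List Int, r.foldl pvStep (c, c.getLast?) = (pvChunk c r, (pvChunk c r).getLast?) := by
  induction r with
  | nil => intro c; simp [pvChunk]
  | cons x t ih =>
    intro c
    have hct : t.IsChain (· ≠ ·) := hr.tail
    have hhead : ∀ z, t.head? = some z → z ≠ x := by
      intro z hz
      cases t with
      | nil => simp at hz
      | cons w t' =>
        have hxw : x ≠ w := (List.isChain_cons_cons.mp hr).1
        simp at hz; omega
    cases hc : c.getLast? with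
    | none =>
      have hstep : pvStep (c, (none : Option Int)) x = (c ++ [x], some x) := by simp [pvStep]
      have h2 : (some x : Option Int) = (c ++ [x]).getLast? := by simp
      have hch : pvChunk (c ++ [x]) t = (c ++ [x]) ++ t := by
        apply pvChunk_append
        intro z hz; simp; intro he; exact hhead z hz he.symm
      have hcx : pvChunk c (x :: t) = c ++ (x :: t) := by simp [pvChunk, hc]
      calc (x :: t).foldl pvStep (c, none)
          = t.foldl pvStep (c ++ [x], (c ++ [x]).getLast?) := by
            rw [List.foldl_cons, hstep, h2]
        _ = (pvChunk (c ++ [x]) t, (pvChunk (c ++ [x]) t).getLast?) := ih hct (c ++ [x])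
        _ = (pvChunk c (x :: t), (pvChunk c (x :: t)).getLast?) := by
            rw [hch, hcx]; simp
    | some y =>
      by_cases hxy : x = y
      · subst hxy
        have hstep : pvStep (c, some x) x = (c, some x) := by simp [pvStep]
        have hch : pvChunk c t = c ++ t := by
          apply pvChunk_append
          intro z hz; rw [hc]; intro he
          have hxz : x = z := by injection he
          exact hhead z hz hxz.symm
        have hcx : pvChunk c (x :: t) = c ++ t := by simp [pvChunk, hc]
        calc (x :: t).foldl pvStep (c, some x)
            = t.foldl pvStep (c, c.getLast?) := by rw [List.foldl_cons, hstep, ← hc]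
          _ = (pvChunk c t, (pvChunk c t).getLast?) := ih hct c
          _ = (pvChunk c (x :: t), (pvChunk c (x :: t)).getLast?) := by rw [hch, hcx]
      · have hstep : pvStep (c, some y) x = (c ++ [x], some x) := by simp [pvStep, hxy]
        have h2 : (some x : Option Int) = (c ++ [x]).getLast? := by simp
        have hch : pvChunk (c ++ [x]) t = (c ++ [x]) ++ t := by
          apply pvChunk_append
          intro z hz; simp; intro he; exact hhead z hz he.symm
        have hcx : pvChunk c (x :: t) = c ++ (x :: t) := by simp [pvChunk, hc, hxy]
        calc (x :: t).foldl pvStep (c, some y)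
            = t.foldl pvStep (c ++ [x], (c ++ [x]).getLast?) := by
              rw [List.foldl_cons, hstep, h2]
          _ = (pvChunk (c ++ [x]) t, (pvChunk (c ++ [x]) t).getLast?) := ih hct (c ++ [x])
          _ = (pvChunk c (x :: t), (pvChunk c (x :: t)).getLast?) := by
              rw [hch, hcx]; simp

-- A's outer fold over the ranges equals B's fold, with snd = getLast? of fst
theorem pvMain (arr : List Int) (n t : Int) :
    ∀ c : List Int,
      arr.foldl (fun s i => (get_adjusted_indices i n t).foldl pvStep s) (c, c.getLast?) =
        (arr.foldl (fun c i => pvChunk c (get_adjusted_indices i n t)) c,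
         (arr.foldl (fun c i => pvChunk c (get_adjusted_indices i n t)) c).getLast?) := by
  induction arr with
  | nil => intro c; rfl
  | cons i rest ih =>
    intro c
    simp only [List.foldl_cons, pvInner _ (pvChain_ga i n t) c, ih]

-- ===== VERDICT (by name: the statement is the Claim_ definition above) =====
theorem expand_indices_with_adjacent_spec : Claim_equal_expand_indices_with_adjacent := by
  intro array n_adjacent total_length _
  unfold Spec_expand_indices_with_adjacent expand_indices_with_adjacent expand_indices_with_adjacent_alt
  change (List.foldl (fun s sublist => List.foldl pvStep s sublist) ([], ([] : List Int).getLast?)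
      (array.map (fun i => get_adjusted_indices i n_adjacent total_length))).1 =
    List.foldl (fun c i => pvChunk c (get_adjusted_indices i n_adjacent total_length)) [] array
  rw [List.foldl_map]
  exact congrArg Prod.fst (pvMain array n_adjacent total_length [])
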